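-- pv_equiv track=rewrite | github.com/spiralgang/DevUtilityV2-InnovativeToolchestAI | ai/secondary_ai_validation.py | _analyze_code_issues
-- ===== SOURCE A (Python) =====
-- from typing import Dict, List, Any, Optional
--
-- def _analyze_code_issues(code: str, language: str) -> List[str]:
--     """Simulate code quality issue detection"""
--     issues = []
--
--     lines = code.split('\n')
--
--     # Check for basic issues
--     if len([line for line in lines if line.strip()]) > 100:
--         issues.append("Function/class too long - consider breaking down")
--
--     if any(len(line) > 120 for line in lines):
--         issues.append("Lines too long - exceeds 120 character limit")
--
--     if language.lower() in ['kotlin', 'java'] and '!!' in code: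
--         issues.append("Non-null assertion operator (!!) usage detected")
--
--     if code.count('TODO') > 0:
--         issues.append("TODO comments found - incomplete implementation")
--
--     # Indentation check
--     indented_lines = [line for line in lines if line.startswith('    ') or line.startswith('\t')]
--     if len(lines) > 10 and len(indented_lines) / len(lines) < 0.3:
--         issues.append("Inconsistent indentation detected")
--
--     return issues
-- ===== SOURCE B (Python) =====
-- def _analyze_code_issues(code: str, language: str) -> list:
--     """Character-level line-state machine: never builds a line list; tracks each
--     line's length, content, leading spaces and first-char-tab as it streams the
--     characters, closing a line at every newline (plus one sentinel newline)."""
--     nlines = nonempty = indented = 0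
--     over120 = False
--     col = lead = 0
--     content = tab0 = False
--     for ch in code + '\n':
--         if ch == '\n':
--             nlines += 1
--             if content:
--                 nonempty += 1
--             if tab0 or lead >= 4:
--                 indented += 1
--             if col > 120:
--                 over120 = True
--             col = lead = 0
--             content = tab0 = False
--         else:
--             if col == 0 and ch == '\t':
--                 tab0 = True
--             if col == lead and ch == ' ':
--                 lead += 1
--             if not ch.isspace():
--                 content = True
--             col += 1
--     issues = []
--     if nonempty > 100:
--         issues.append("Function/class too long - consider breaking down")
--     if over120:
--         issues.append("Lines too long - exceeds 120 character limit")
--     if language.lower() in ('kotlin', 'java') and '!!' in code: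
--         issues.append("Non-null assertion operator (!!) usage detected")
--     if 'TODO' in code:
--         issues.append("TODO comments found - incomplete implementation")
--     if nlines > 10 and 10 * indented < 3 * nlines:
--         issues.append("Inconsistent indentation detected")
--     return issues
-- ===== Notes on version B (the rewrite author's own statement) =====
-- stated objective: alternative
-- what changed: A splits the code into a line list and runs several list comprehensions/any over it; B never materializes a line list: it streams the characters once through a small line-state machine (column, leading-space run, first-char-tab, has-content flags) that closes a line at each newline, then reports from the accumulated counters using exact integer arithmetic for the 0.3 ratio.
import Mathlib
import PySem

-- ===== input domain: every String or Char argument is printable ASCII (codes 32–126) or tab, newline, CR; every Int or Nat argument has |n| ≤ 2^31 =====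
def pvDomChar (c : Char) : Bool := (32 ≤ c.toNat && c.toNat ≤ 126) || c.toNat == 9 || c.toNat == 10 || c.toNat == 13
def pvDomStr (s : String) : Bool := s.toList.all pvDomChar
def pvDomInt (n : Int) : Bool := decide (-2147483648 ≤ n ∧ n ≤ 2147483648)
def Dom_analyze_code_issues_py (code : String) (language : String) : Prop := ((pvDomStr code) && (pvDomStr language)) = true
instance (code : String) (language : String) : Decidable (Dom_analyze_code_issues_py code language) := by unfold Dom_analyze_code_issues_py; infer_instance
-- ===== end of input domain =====

-- B replaces A's split-into-lines + several list scans by a single character-level line-state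
-- machine with O(1) extra state, then reports from the accumulated counters (objective: alternative).


-- ===== PORT A =====
-- Transliteration of _analyze_code_issues. The float comparison
-- `len(indented_lines) / len(lines) < 0.3` is ported as the exact integer test
-- `10 * indented < 3 * total`: float division is correctly rounded, so the two agree for every
-- line count below ~10^15 (in particular on the whole ASCII-string domain reachable here).
def analyze_code_issues_py (code : String) (language : String) : List String :=
  let issues : List String := []
  let lines := PySem.Chars.splitOn code.toList ['\n']
  let issues := if (lines.filter (fun line => !(PySem.Chars.strip line).isEmpty)).length > 100
      then issues ++ ["Function/class too long - consider breaking down"] else issues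
  let issues := if lines.any (fun line => decide (120 < PySem.Chars.len line))
      then issues ++ ["Lines too long - exceeds 120 character limit"] else issues
  let issues := if ["kotlin".toList, "java".toList].contains (PySem.Chars.lower language.toList)
        && PySem.Chars.isIn "!!".toList code.toList
      then issues ++ ["Non-null assertion operator (!!) usage detected"] else issues
  let issues := if PySem.Chars.count code.toList "TODO".toList > 0
      then issues ++ ["TODO comments found - incomplete implementation"] else issues
  let indented_lines := lines.filter (fun line =>
      PySem.Chars.startswith line "    ".toList || PySem.Chars.startswith line "\t".toList)
  let issues := if lines.length > 10 && decide (10 * indented_lines.length < 3 * lines.length)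
      then issues ++ ["Inconsistent indentation detected"] else issues
  issues

-- ===== PORT B =====
-- Transliteration of Source B: the per-iteration variables of its `for ch in code + '\n'` loop.
structure PvSt where
  nlines : Nat
  nonempty : Nat
  indented : Nat
  over120 : Bool
  col : Nat
  content : Bool
  lead : Nat
  tab0 : Bool
deriving Repr, DecidableEq

-- one iteration of Source B's character loop
def pvStep (st : PvSt) (ch : Char) : PvSt :=
  if ch = '\n' then
    { nlines := st.nlines + 1,
      nonempty := st.nonempty + (if st.content then 1 else 0),
      indented := st.indented + (if st.tab0 || decide (4 ≤ st.lead) then 1 else 0),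
      over120 := st.over120 || decide (120 < st.col),
      col := 0, content := false, lead := 0, tab0 := false }
  else
    { st with
      tab0 := st.tab0 || (decide (st.col = 0) && decide (ch = '\t')),
      lead := st.lead + (if st.col = st.lead ∧ ch = ' ' then 1 else 0),
      content := st.content || !PySem.Chars.isspace ch,
      col := st.col + 1 }

def analyze_code_issues_py_alt (code : String) (language : String) : List String :=
  let st := (code.toList ++ ['\n']).foldl pvStep ⟨0, 0, 0, false, 0, false, 0, false⟩
  let issues : List String := []
  let issues := if st.nonempty > 100
      then issues ++ ["Function/class too long - consider breaking down"] else issues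
  let issues := if st.over120
      then issues ++ ["Lines too long - exceeds 120 character limit"] else issues
  let issues := if ["kotlin".toList, "java".toList].contains (PySem.Chars.lower language.toList)
        && PySem.Chars.isIn "!!".toList code.toList
      then issues ++ ["Non-null assertion operator (!!) usage detected"] else issues
  let issues := if PySem.Chars.isIn "TODO".toList code.toList
      then issues ++ ["TODO comments found - incomplete implementation"] else issues
  let issues := if st.nlines > 10 && decide (10 * st.indented < 3 * st.nlines)
      then issues ++ ["Inconsistent indentation detected"] else issues
  issues

-- ===== PRECONDITION & SPEC =====
def Spec_analyze_code_issues_py (code : String) (language : String) (out : List String) : Prop := out = analyze_code_issues_py_alt code language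
instance (code : String) (language : String) (out : List String) : Decidable (Spec_analyze_code_issues_py code language out) := by unfold Spec_analyze_code_issues_py; infer_instance

-- ===== CLAIM (what is proved, stated in full; the proofs are below) =====
def Claim_equal_analyze_code_issues_py : Prop := ∀ (code : String) (language : String), Dom_analyze_code_issues_py code language → Spec_analyze_code_issues_py code language (analyze_code_issues_py code language)

-- ===== LEMMAS AND PROOFS =====

-- Reference splitter: what Python's split('\n') computes, in structurally recursive form.
def pvSplit : List Char → List (List Char)
  | [] => [[]]
  | c :: t => if c = '\n' then [] :: pvSplit t else (pvSplit t).modifyHead (c :: ·)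

theorem pvSplit_ne_nil (l : List Char) : pvSplit l ≠ [] := by
  cases l with
  | nil => simp [pvSplit]
  | cons c t =>
    simp only [pvSplit]
    split
    · simp
    · cases h : pvSplit t with
      | nil => exact absurd h (pvSplit_ne_nil t)
      | cons p ps => simp [List.modifyHead]

theorem pvSplit_go (fuel : Nat) : ∀ (l cur : List Char) (acc : List (List Char)),
    l.length < fuel →
    PySem.Chars.splitOn.go ['\n'] fuel l cur acc
      = acc.reverse ++ (pvSplit l).modifyHead (cur.reverse ++ ·) := by
  induction fuel with
  | zero => intro l cur acc h; omega
  | succ n ih =>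
    intro l cur acc h
    cases l with
    | nil => simp [PySem.Chars.splitOn.go, pvSplit, List.modifyHead]
    | cons c rest =>
      by_cases hc : c = '\n'
      · subst hc
        simp only [PySem.Chars.splitOn.go, List.isPrefixOf, beq_self_eq_true, Bool.true_and,
          if_true, List.length_cons, List.length_nil, List.drop_succ_cons, List.drop_zero]
        rw [ih rest [] _ (by simpa using h)]
        cases h' : pvSplit rest <;> simp [pvSplit, h', List.modifyHead]
      · have hpre : (['\n'].isPrefixOf (c :: rest)) = false := by
          simp [List.isPrefixOf]; exact fun h' => absurd h'.symm hc
        simp only [PySem.Chars.splitOn.go, hpre, if_false, Bool.false_eq_true]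
        rw [ih rest (c :: cur) acc (by simpa using h)]
        simp only [pvSplit, hc, if_false]
        cases h' : pvSplit rest with
        | nil => exact absurd h' (pvSplit_ne_nil rest)
        | cons p ps => simp [List.modifyHead]
      
theorem splitOn_eq_pvSplit (l : List Char) :
    PySem.Chars.splitOn l ['\n'] = pvSplit l := by
  unfold PySem.Chars.splitOn
  rw [pvSplit_go (l.length + 1) l [] [] (by omega)]
  cases h : pvSplit l with
  | nil => exact absurd h (pvSplit_ne_nil l)
  | cons p ps => simp [List.modifyHead]

theorem pvSplit_no_nl (l : List Char) : ∀ p ∈ pvSplit l, '\n' ∉ p := by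
  induction l with
  | nil => simp [pvSplit]
  | cons c t ih =>
    simp only [pvSplit]
    split
    · intro p hp
      rcases List.mem_cons.mp hp with h | h
      · simp [h]
      · exact ih p h
    · rename_i hc
      cases h' : pvSplit t with
      | nil => exact absurd h' (pvSplit_ne_nil t)
      | cons q qs =>
        intro p hp
        simp only [h', List.modifyHead] at hp
        rcases List.mem_cons.mp hp with h | h
        · subst h
          intro hmem
          rcases List.mem_cons.mp hmem with h | h
          · exact hc h.symm
          · exact ih q (h' ▸ List.mem_cons_self ..) h
        · exact ih p (h' ▸ List.mem_cons_of_mem q h)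

theorem flatten_pvSplit (l : List Char) :
    ((pvSplit l).map (· ++ ['\n'])).flatten = l ++ ['\n'] := by
  induction l with
  | nil => simp [pvSplit]
  | cons c t ih =>
    simp only [pvSplit]
    split
    · rename_i hc
      subst hc
      simp [ih]
    · cases h' : pvSplit t with
      | nil => exact absurd h' (pvSplit_ne_nil t)
      | cons q qs =>
        rw [h'] at ih
        simp only [List.modifyHead, List.map_cons, List.flatten_cons] at ih ⊢
        simp [← ih]

-- the per-line quantities B's state machine tracks, as functions of the finished line
def pvCont (line : List Char) : Bool := line.any (fun c => !PySem.Chars.isspace c)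
def pvLead (line : List Char) : Nat := (line.takeWhile (· == ' ')).length
def pvTab (line : List Char) : Bool := decide (line.head? = some '\t')
def pvInd (line : List Char) : Bool := pvTab line || decide (4 ≤ pvLead line)
def pvLong (line : List Char) : Bool := decide (120 < line.length)

theorem pvLead_append (pref : List Char) (ch : Char) :
    pvLead (pref ++ [ch])
      = pvLead pref + (if pref.length = pvLead pref ∧ ch = ' ' then 1 else 0) := by
  induction pref with
  | nil =>
    by_cases h : ch = ' ' <;> simp [pvLead, List.takeWhile, h]
  | cons p ps ih =>
    by_cases hp : p = ' '
    · subst hp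
      have hL : ∀ xs : List Char, pvLead (' ' :: xs) = pvLead xs + 1 := by
        intro xs; simp [pvLead, List.takeWhile_cons]
      rw [List.cons_append, hL, hL, ih]
      simp only [List.length_cons, add_left_inj]
      split_ifs <;> omega
    · have hb : ((p == ' ') = false) := by simpa using hp
      simp [pvLead, List.takeWhile_cons, hb, hp]

theorem pvCont_append (pref : List Char) (ch : Char) :
    pvCont (pref ++ [ch]) = (pvCont pref || !PySem.Chars.isspace ch) := by
  simp [pvCont]

theorem pvTab_append (pref : List Char) (ch : Char) :
    pvTab (pref ++ [ch]) = (pvTab pref || (decide (pref.length = 0) && decide (ch = '\t'))) := by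
  cases pref <;> simp [pvTab]

theorem fold_chars (line : List Char) : ∀ (pref : List Char) (a b c : Nat) (d : Bool),
    '\n' ∉ line →
    line.foldl pvStep ⟨a, b, c, d, pref.length, pvCont pref, pvLead pref, pvTab pref⟩
      = ⟨a, b, c, d, (pref ++ line).length, pvCont (pref ++ line),
         pvLead (pref ++ line), pvTab (pref ++ line)⟩ := by
  induction line with
  | nil => intro pref a b c d _; simp
  | cons ch rest ih =>
    intro pref a b c d hnl
    have hch : ch ≠ '\n' := fun h => hnl (h ▸ List.mem_cons_self ..)
    have hrest : '\n' ∉ rest := fun h => hnl (List.mem_cons_of_mem ch h)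
    have hstep : pvStep ⟨a, b, c, d, pref.length, pvCont pref, pvLead pref, pvTab pref⟩ ch
        = ⟨a, b, c, d, (pref ++ [ch]).length, pvCont (pref ++ [ch]),
           pvLead (pref ++ [ch]), pvTab (pref ++ [ch])⟩ := by
      simp [pvStep, hch, pvCont_append, pvTab_append, pvLead_append]
    rw [List.foldl_cons, hstep, ih (pref ++ [ch]) a b c d hrest]
    simp

theorem fold_line (line : List Char) (a b c : Nat) (d : Bool) (hnl : '\n' ∉ line) :
    (line ++ ['\n']).foldl pvStep ⟨a, b, c, d, 0, false, 0, false⟩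
      = ⟨a + 1, b + (if pvCont line then 1 else 0), c + (if pvInd line then 1 else 0),
         d || pvLong line, 0, false, 0, false⟩ := by
  have h0 : (⟨a, b, c, d, 0, false, 0, false⟩ : PvSt)
      = ⟨a, b, c, d, ([] : List Char).length, pvCont [], pvLead [], pvTab []⟩ := by
    simp [pvCont, pvLead, pvTab]
  rw [List.foldl_append, h0, fold_chars line [] a b c d hnl]
  simp [pvStep, pvInd, pvLong]

theorem fold_lines (ls : List (List Char)) :
    (∀ p ∈ ls, '\n' ∉ p) → ∀ (a b c : Nat) (d : Bool),
    ((ls.map (· ++ ['\n'])).flatten).foldl pvStep ⟨a, b, c, d, 0, false, 0, false⟩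
      = ⟨a + ls.length, b + ls.countP pvCont, c + ls.countP pvInd,
         d || ls.any pvLong, 0, false, 0, false⟩ := by
  induction ls with
  | nil => intro _ a b c d; simp
  | cons x xs ih =>
    intro hno a b c d
    rw [List.map_cons, List.flatten_cons, List.foldl_append]
    rw [fold_line x a b c d (hno x (List.mem_cons_self ..)),
        ih (fun p hp => hno p (List.mem_cons_of_mem x hp))]
    simp only [PvSt.mk.injEq, List.length_cons, List.countP_cons, List.any_cons, and_true]
    refine ⟨by omega, by split_ifs <;> omega, by split_ifs <;> omega, by simp [Bool.or_assoc]⟩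

-- B's whole character pass, in terms of the line decomposition
theorem fold_stats (l : List Char) :
    (l ++ ['\n']).foldl pvStep ⟨0, 0, 0, false, 0, false, 0, false⟩
      = ⟨(pvSplit l).length, (pvSplit l).countP pvCont, (pvSplit l).countP pvInd,
         (pvSplit l).any pvLong, 0, false, 0, false⟩ := by
  rw [← flatten_pvSplit l, fold_lines (pvSplit l) (pvSplit_no_nl l)]
  simp

-- A's per-line tests coincide with B's tracked quantities
theorem strip_empty (l : List Char) :
    (PySem.Chars.strip l).isEmpty = !pvCont l := by
  simp only [PySem.Chars.strip, PySem.Chars.rstrip, PySem.Chars.lstrip, pvCont,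
    List.isEmpty_iff, List.reverse_eq_nil_iff]
  cases hA : l.any (fun c => !PySem.Chars.isspace c) with
  | false =>
    have hall : ∀ x ∈ l, PySem.Chars.isspace x := by
      intro x hx
      have := List.any_eq_false.mp hA x hx
      simpa using this
    simp [List.dropWhile_eq_nil_iff.mpr hall]
  | true =>
    rcases List.any_eq_true.mp hA with ⟨x, hx, hxs⟩
    have hxs : ¬ PySem.Chars.isspace x = true := by simpa using hxs
    have hx1 : x ∈ l.dropWhile PySem.Chars.isspace := by
      rcases List.mem_append.mp (by rw [List.takeWhile_append_dropWhile]; exact hx :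
          x ∈ l.takeWhile PySem.Chars.isspace ++ l.dropWhile PySem.Chars.isspace) with h | h
      · exact absurd (List.mem_takeWhile_imp h) hxs
      · exact h
    have : ¬ ((l.dropWhile PySem.Chars.isspace).reverse.dropWhile PySem.Chars.isspace = []) := by
      intro hnil
      exact hxs (List.dropWhile_eq_nil_iff.mp hnil x (List.mem_reverse.mpr hx1))
    simp [this]

theorem startswith_tab (l : List Char) :
    PySem.Chars.startswith l "\t".toList = pvTab l := by
  rw [show ("\t".toList : List Char) = ['\t'] from rfl]
  cases l with
  | nil => simp [PySem.Chars.startswith, List.isPrefixOf, pvTab]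
  | cons x xs =>
    by_cases hx : x = '\t'
    · subst hx; simp [PySem.Chars.startswith, List.isPrefixOf, pvTab]
    · have h1 : ('\t' == x) = false := beq_eq_false_iff_ne.mpr (fun h => hx h.symm)
      simp [PySem.Chars.startswith, List.isPrefixOf, pvTab, h1, hx]

theorem prefix_spaces (n : Nat) : ∀ l : List Char,
    (List.replicate n ' ').isPrefixOf l = decide (n ≤ pvLead l) := by
  induction n with
  | zero => intro l; simp [List.isPrefixOf]
  | succ m ih =>
    intro l
    cases l with
    | nil => simp [List.replicate, List.isPrefixOf, pvLead]
    | cons x xs =>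
      by_cases hx : x = ' '
      · subst hx
        simp [List.replicate_succ, List.isPrefixOf, ih xs, pvLead, List.takeWhile_cons]
      · have hb : ((' ' == x) = false) := by simpa using fun h => hx h.symm
        have hb2 : ((x == ' ') = false) := by simpa using hx
        simp [List.replicate_succ, List.isPrefixOf, hb, pvLead, List.takeWhile_cons, hb2]

theorem startswith_spaces (l : List Char) :
    PySem.Chars.startswith l "    ".toList = decide (4 ≤ pvLead l) := by
  have : "    ".toList = List.replicate 4 ' ' := by decide
  rw [PySem.Chars.startswith, this, prefix_spaces 4 l]

theorem indent_test (l : List Char) :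
    (PySem.Chars.startswith l "    ".toList || PySem.Chars.startswith l "\t".toList)
      = pvInd l := by
  rw [startswith_spaces, startswith_tab, pvInd, Bool.or_comm]

theorem long_test (l : List Char) :
    (decide (120 < PySem.Chars.len l)) = pvLong l := by
  simp only [PySem.Chars.len, pvLong, decide_eq_decide]
  omega

-- `s.count(sub) > 0` agrees with `sub in s` for nonempty sub
theorem count_go_le (sub : List Char) :
    ∀ fuel (l : List Char) (acc : Nat), acc ≤ PySem.Chars.count.go sub fuel l acc := by
  intro fuel
  induction fuel with
  | zero => intro l acc; simp [PySem.Chars.count.go]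
  | succ n ih =>
    intro l acc
    cases l with
    | nil => simp [PySem.Chars.count.go]
    | cons h t =>
      simp only [PySem.Chars.count.go]
      split
      · exact le_trans (Nat.le_succ acc) (ih _ _)
      · exact ih _ _

theorem count_go_eq_iff (sub : List Char) (hsub : sub ≠ []) :
    ∀ fuel (l : List Char) (acc : Nat), l.length ≤ fuel →
      (PySem.Chars.count.go sub fuel l acc = acc ↔ ∀ j, ¬ sub <+: l.drop j) := by
  intro fuel
  induction fuel with
  | zero =>
    intro l acc hlen
    have : l = [] := List.length_eq_zero_iff.mp (Nat.le_zero.mp hlen)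
    subst this
    simp [PySem.Chars.count.go, List.prefix_nil, hsub]
  | succ n ih =>
    intro l acc hlen
    cases l with
    | nil => simp [PySem.Chars.count.go, List.prefix_nil, hsub]
    | cons h t =>
      simp only [PySem.Chars.count.go]
      split
      · rename_i hpre
        have hp : sub <+: (h :: t) := List.isPrefixOf_iff_prefix.mp hpre
        constructor
        · intro heq
          have := count_go_le sub n (List.drop sub.length (h :: t)) (acc + 1)
          omega
        · intro hall
          exact absurd hp (by simpa using hall 0)
      · rename_i hpre
        have hnp : ¬ sub <+: (h :: t) := fun hc => hpre (List.isPrefixOf_iff_prefix.mpr hc)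
        rw [ih t acc (by simpa using Nat.lt_succ_iff.mp (Nat.lt_of_lt_of_le (Nat.lt_succ_of_le (Nat.le_refl _)) (by simpa using hlen)))]
        constructor
        · intro hall j
          cases j with
          | zero => simpa using hnp
          | succ k => simpa using hall k
        · intro hall j
          simpa using hall (j + 1)

theorem count_pos_iff_isIn (s sub : List Char) (hsub : sub ≠ []) :
    (0 < PySem.Chars.count s sub) ↔ PySem.Chars.isIn sub s = true := by
  rw [← PySem.Chars.exists_prefix_drop_iff_isIn]
  unfold PySem.Chars.count
  simp only [List.isEmpty_iff, hsub, if_false]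
  rw [Nat.pos_iff_ne_zero, ne_eq, count_go_eq_iff sub hsub s.length s 0 (le_refl _)]
  simp only [not_forall, not_not]

-- ===== VERDICT (by name: the statement is the Claim_ definition above) =====
theorem analyze_code_issues_py_spec : Claim_equal_analyze_code_issues_py := by
  intro code language _
  unfold Spec_analyze_code_issues_py analyze_code_issues_py analyze_code_issues_py_alt
  rw [fold_stats, splitOn_eq_pvSplit]
  simp only [List.countP_eq_length_filter, strip_empty, indent_test, long_test,
    Bool.not_not, count_pos_iff_isIn code.toList "TODO".toList (by decide)]
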